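-- pv_equiv track=rewrite | github.com/tlamDson/Advent_of_code | Day_2/day_2_part_2.py | is_repeated_pattern
-- ===== SOURCE A (Python) =====
-- def is_repeated_pattern(num):
--     s = str(num)
--     length = len(s)
--     for L in range(1, (length // 2) + 1):
--         if length % L == 0:
--             pattern = s[:L]
--             repetitions = length // L
--             if pattern * repetitions == s:
--                 return True
--
--     return False
-- ===== SOURCE B (Python) =====
-- def is_repeated_pattern(num):
--     s = str(num)
--     return (s + s).find(s, 1) != len(s)
-- ===== Notes on version B (the rewrite author's own statement) =====
-- stated objective: idiomatic
-- what changed: Replaces the divisor loop with per-divisor pattern multiplication by the single string-doubling test (s+s).find(s,1) != len(s).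
import Mathlib
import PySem

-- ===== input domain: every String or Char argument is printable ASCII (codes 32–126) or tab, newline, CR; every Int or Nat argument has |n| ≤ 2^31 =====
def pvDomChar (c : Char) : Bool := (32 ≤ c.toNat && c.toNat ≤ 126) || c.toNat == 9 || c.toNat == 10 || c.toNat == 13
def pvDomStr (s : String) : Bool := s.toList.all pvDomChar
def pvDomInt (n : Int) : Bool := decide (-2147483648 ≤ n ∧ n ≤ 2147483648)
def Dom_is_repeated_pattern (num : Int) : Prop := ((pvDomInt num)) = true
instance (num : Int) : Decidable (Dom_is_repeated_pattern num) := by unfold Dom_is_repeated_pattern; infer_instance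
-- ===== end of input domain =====

-- B replaces A's divisor loop (try every pattern length, multiply the pattern out) by the
-- string-doubling idiom (s+s).find(s, 1) != len(s); same return value on every int.

-- ===== PORT A =====
-- the 'for L in range(...)' loop with its early 'return True'
def isRepLoopA (s : List Char) (length : Int) : List Int → Bool
  | [] => false
  | L :: rest =>
    if PySem.Int.mod length L = 0 then
      let pattern := PySem.List.slice s none (some L)
      let repetitions := PySem.Int.floordiv length L
      if PySem.List.pyRepeat pattern repetitions = s then true
      else isRepLoopA s length rest
    else isRepLoopA s length rest

def is_repeated_pattern (num : Int) : Bool :=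
  let s := PySem.Int.toChars num
  let length : Int := PySem.List.len s
  isRepLoopA s length (PySem.List.pyRange 1 (PySem.Int.floordiv length 2 + 1) 1)

-- ===== PORT B =====
def is_repeated_pattern_alt (num : Int) : Bool :=
  let s := PySem.Int.toChars num
  PySem.Chars.findFrom (s ++ s) s 1 != PySem.List.len s

-- ===== PRECONDITION & SPEC =====
def Spec_is_repeated_pattern (num : Int) (out : Bool) : Prop := out = is_repeated_pattern_alt num
instance (num : Int) (out : Bool) : Decidable (Spec_is_repeated_pattern num out) := by unfold Spec_is_repeated_pattern; infer_instance

-- ===== CLAIM (what is proved, stated in full; the proofs are below) =====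
def Claim_equal_is_repeated_pattern : Prop := ∀ (num : Int), Dom_is_repeated_pattern num → Spec_is_repeated_pattern num (is_repeated_pattern num)

-- ===== LEMMAS AND PROOFS =====

-- str(num) is never empty
theorem toChars_ne_nil (n : Int) : PySem.Int.toChars n ≠ [] := by
  unfold PySem.Int.toChars
  split
  · simp
  · have : 0 < (Nat.toDigits 10 n.toNat).length := Nat.length_toDigits_pos
    intro h; simp [h] at this

-- commuting lists are powers of the shorter one
theorem commute_eq_flatten_replicate {α : Type} (m : Nat) :
    ∀ (p t : List α), t ++ p = p ++ t → t.length = m * p.length →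
      t = (List.replicate m p).flatten := by
  induction m with
  | zero => intro p t _ hl; simp at hl ⊢; exact hl
  | succ m ih =>
    intro p t hc hl
    rcases eq_or_ne p [] with rfl | hp
    · simp at hl ⊢; exact hl
    have hplen : 0 < p.length := List.length_pos_iff.mpr hp
    have hle : p.length ≤ t.length := by
      rw [hl]; nlinarith
    have hpt : List.take p.length t = p := by
      have := congrArg (List.take p.length) hc
      rwa [List.take_append_of_le_length hle, List.take_left] at this
    have ht : t = p ++ List.drop p.length t := by
      conv_lhs => rw [← List.take_append_drop p.length t, hpt]
    set t' := List.drop p.length t with ht'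
    have hc' : t' ++ p = p ++ t' := by
      have : p ++ (t' ++ p) = p ++ (p ++ t') := by
        rw [← List.append_assoc, ← ht, hc, ht]
      exact List.append_cancel_left this
    have hl' : t'.length = m * p.length := by
      have : t'.length = t.length - p.length := by simp [ht']
      rw [this, hl]; ring_nf; omega
    rw [ht, ih p t' hc' hl', List.replicate_succ, List.flatten_cons]

-- a list fixed by rotation by a divisor of its length is that power of its prefix
theorem rotate_divisor_eq_power {α : Type} (s : List α) (j : Nat) (hj : 0 < j)
    (hsne : s ≠ []) (hdvd : j ∣ s.length) (hrot : s.rotate j = s) :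
    (List.replicate (s.length / j) (s.take j)).flatten = s := by
  have hpos : 0 < s.length := List.length_pos_iff.mpr hsne
  have hjle : j ≤ s.length := Nat.le_of_dvd hpos hdvd
  have hcomm : List.drop j s ++ List.take j s = List.take j s ++ List.drop j s := by
    rw [← List.rotate_eq_drop_append_take hjle, hrot, List.take_append_drop]
  have hlen : (List.drop j s).length = (s.length / j - 1) * (List.take j s).length := by
    simp [List.length_take, min_eq_left hjle]
    rcases hdvd with ⟨c, hc⟩
    have hc1 : 1 ≤ c := by nlinarith [hjle]
    rw [hc, Nat.mul_div_cancel_left _ hj]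
    cases c with
    | zero => omega
    | succ c => simp; ring_nf; omega
  have hdrop := commute_eq_flatten_replicate (s.length / j - 1) (List.take j s)
      (List.drop j s) hcomm hlen
  have hm : s.length / j = (s.length / j - 1) + 1 := by
    have : 1 ≤ s.length / j := Nat.one_le_div_iff hj |>.mpr hjle
    omega
  rw [hm, List.replicate_succ, List.flatten_cons, ← hdrop, List.take_append_drop]

-- conversely, a power of its length-j prefix is fixed by rotation by j
theorem power_rotate {α : Type} (s : List α) (j m : Nat) (_hj : 0 < j) (hm : 0 < m)
    (hjle : j ≤ s.length)
    (hpow : (List.replicate m (List.take j s)).flatten = s) :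
    s.rotate j = s := by
  have hjlen : (List.take j s).length = j := by simp [min_eq_left hjle]
  obtain ⟨k, rfl⟩ : ∃ k, m = k + 1 := ⟨m - 1, by omega⟩
  have hsplit : s = List.take j s ++ (List.replicate k (List.take j s)).flatten := by
    conv_lhs => rw [← hpow]
    rw [List.replicate_succ, List.flatten_cons]
  have hdrop : List.drop j s = (List.replicate k (List.take j s)).flatten := by
    conv_lhs => rw [hsplit]
    exact List.drop_left' hjlen
  rw [List.rotate_eq_drop_append_take hjle, hdrop]
  conv_rhs => rw [← hpow]
  rw [List.replicate_succ', List.flatten_append]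
  simp

-- occurrence of s inside (s++s) at offset j (1 ≤ j ≤ n) is exactly rotation-fixedness
theorem prefix_drop_iff_rotate (s : List Char) (j : Nat) (hj1 : 1 ≤ j)
    (hjn : j ≤ s.length) :
    (s <+: (s ++ s).drop j) ↔ s.rotate j = s := by
  have hdrop : (s ++ s).drop j = List.drop j s ++ s := List.drop_append_of_le_length hjn
  rw [hdrop, List.prefix_iff_eq_take, List.rotate_eq_drop_append_take hjn]
  rw [List.take_append]
  have h1 : List.take s.length (List.drop j s) = List.drop j s := by
    apply List.take_of_length_le; simp
  have h2 : s.length - (List.drop j s).length = j := by simp; omega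
  rw [h1, h2]
  constructor <;> (intro h; exact h.symm)

-- A's loop is an existential over the range
theorem isRepLoopA_iff (s : List Char) (len : Int) (r : List Int) :
    isRepLoopA s len r = true ↔
      ∃ L ∈ r, PySem.Int.mod len L = 0 ∧
        PySem.List.pyRepeat (PySem.List.slice s none (some L)) (PySem.Int.floordiv len L) = s := by
  induction r with
  | nil => simp [isRepLoopA]
  | cons L rest ih =>
    simp only [isRepLoopA]
    split_ifs with h1 h2
    · simp [h1, h2]
    · simp only [List.mem_cons]
      constructor
      · intro h; rcases ih.mp h with ⟨L', hL', h'⟩; exact ⟨L', Or.inr hL', h'⟩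
      · rintro ⟨L', (rfl | hL'), h'⟩
        · exact absurd h'.2 h2
        · exact ih.mpr ⟨L', hL', h'⟩
    · simp only [List.mem_cons]
      constructor
      · intro h; rcases ih.mp h with ⟨L', hL', h'⟩; exact ⟨L', Or.inr hL', h'⟩
      · rintro ⟨L', (rfl | hL'), h'⟩
        · exact absurd h'.1 h1
        · exact ih.mpr ⟨L', hL', h'⟩

-- casts: floordiv/mod on naturals
theorem floordiv_natCast (a b : Nat) : PySem.Int.floordiv (a : Int) (b : Int) = ((a / b : Nat) : Int) := by
  simp [PySem.Int.floordiv]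
  exact (Int.ofNat_fdiv a b).symm

theorem mod_natCast_eq_zero_iff (a b : Nat) (_hb : 0 < b) :
    PySem.Int.mod (a : Int) (b : Int) = 0 ↔ b ∣ a := by
  rw [PySem.Int.mod, ← Int.ofNat_fmod a b]
  omega

-- multiples of a fixed rotation amount still fix the list
theorem rotate_mul_eq_self {α : Type} (s : List α) (g : Nat) (h : s.rotate g = s) :
    ∀ k : Nat, s.rotate (g * k) = s := by
  intro k
  induction k with
  | zero => simp
  | succ k ih =>
    have : g * (k + 1) = g * k + g := by ring
    rw [this, ← List.rotate_rotate, ih, h]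

-- the minimal positive fixed rotation divides every fixed rotation's length
theorem exists_div_iff_exists_rot (s : List Char) (hs : 0 < s.length) :
    (∃ j : Nat, 1 ≤ j ∧ j ≤ s.length / 2 ∧ j ∣ s.length ∧
        (List.replicate (s.length / j) (s.take j)).flatten = s) ↔
      (∃ j : Nat, 1 ≤ j ∧ j < s.length ∧ s.rotate j = s) := by
  constructor
  · rintro ⟨j, hj1, hj2, hdvd, hpow⟩
    have hjn : j ≤ s.length := le_trans hj2 (Nat.div_le_self _ _)
    have hm : 0 < s.length / j := (Nat.one_le_div_iff hj1).mpr hjn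
    refine ⟨j, hj1, by omega, power_rotate s j (s.length / j) hj1 hm hjn hpow⟩
  · rintro ⟨j, hj1, hj2, hrot⟩
    have hex : ∃ k : Nat, 0 < k ∧ s.rotate k = s := ⟨j, hj1, hrot⟩
    set g := Nat.find hex with hg
    obtain ⟨hg1, hgrot⟩ := Nat.find_spec hex
    have hgle : g ≤ j := Nat.find_le ⟨hj1, hrot⟩
    have hgdvd : g ∣ s.length := by
      have hr : s.rotate (s.length % g) = s := by
        have heq : s.length % g + g * (s.length / g) = s.length := Nat.mod_add_div _ _
        have h1 : s.rotate (s.length % g + g * (s.length / g)) = s := by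
          rw [heq, List.rotate_length]
        rw [← List.rotate_rotate] at h1
        have h2 : (s.rotate (s.length % g)).rotate (g * (s.length / g)) =
            s.rotate (s.length % g) := by
          rw [List.rotate_rotate, Nat.add_comm, ← List.rotate_rotate,
            rotate_mul_eq_self s g hgrot]
        rw [h2] at h1; exact h1
      by_contra hnd
      have hrpos : 0 < s.length % g :=
        Nat.pos_of_ne_zero fun h => hnd (Nat.dvd_of_mod_eq_zero h)
      have hle : g ≤ s.length % g := Nat.find_le ⟨hrpos, hr⟩
      have hlt : s.length % g < g := Nat.mod_lt s.length hg1
      omega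
    have hgn : g < s.length := by omega
    have hg2 : g ≤ s.length / 2 := by
      rcases hgdvd with ⟨c, hc⟩
      have hc2 : 2 ≤ c := by nlinarith
      have : 2 * g ≤ s.length := by nlinarith
      omega
    exact ⟨g, hg1, hg2, hgdvd, rotate_divisor_eq_power s g hg1
      (List.length_pos_iff.mp hs) hgdvd hgrot⟩

-- main equivalence over an arbitrary nonempty list of characters
theorem main_iff (s : List Char) (hs : s ≠ []) :
    isRepLoopA s (PySem.List.len s)
        (PySem.List.pyRange 1 (PySem.Int.floordiv (PySem.List.len s) 2 + 1) 1) =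
      (PySem.Chars.findFrom (s ++ s) s 1 != PySem.List.len s) := by
  have hn : 0 < s.length := List.length_pos_iff.mpr hs
  set n := s.length with hndef
  -- A's loop as an existential over pattern lengths
  have hA : isRepLoopA s (PySem.List.len s)
      (PySem.List.pyRange 1 (PySem.Int.floordiv (PySem.List.len s) 2 + 1) 1) = true ↔
      ∃ j : Nat, 1 ≤ j ∧ j ≤ n / 2 ∧ j ∣ n ∧
        (List.replicate (n / j) (s.take j)).flatten = s := by
    rw [isRepLoopA_iff]
    have hlen : PySem.List.len s = (n : Int) := by simp [← hndef]
    rw [hlen]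
    have h2 : PySem.Int.floordiv (n : Int) 2 = ((n / 2 : Nat) : Int) := by
      have := floordiv_natCast n 2; exact_mod_cast this
    rw [h2]
    constructor
    · rintro ⟨L, hL, hmod, hrep⟩
      rw [PySem.List.mem_pyRange_one] at hL
      lift L to Nat using (by omega : (0:Int) ≤ L) with j
      have hj1 : 1 ≤ j := by exact_mod_cast hL.1
      have hj2 : j ≤ n / 2 := by
        have := hL.2; omega
      refine ⟨j, hj1, hj2, ?_, ?_⟩
      · exact (mod_natCast_eq_zero_iff n j (by omega)).mp hmod
      · rw [PySem.List.slice_to_natCast, floordiv_natCast] at hrep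
        simpa [PySem.List.pyRepeat] using hrep
    · rintro ⟨j, hj1, hj2, hdvd, hpow⟩
      refine ⟨(j : Int), ?_, ?_, ?_⟩
      · rw [PySem.List.mem_pyRange_one]
        constructor
        · exact_mod_cast hj1
        · exact_mod_cast Nat.lt_succ_of_le hj2
      · exact (mod_natCast_eq_zero_iff n j (by omega)).mpr hdvd
      · rw [PySem.List.slice_to_natCast, floordiv_natCast]
        simpa [PySem.List.pyRepeat] using hpow
  -- B's doubling test as an existential over fixed rotations
  have hlen2 : 1 ≤ (s ++ s).length := by simp; omega
  have hocc : s <:+: (s ++ s).drop 1 := by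
    rw [List.drop_append_of_le_length hn]
    exact (List.suffix_append _ _).isInfix
  have hc1 : ((1 : Nat) : Int) = 1 := by norm_num
  have hne : PySem.Chars.findFrom (s ++ s) s ((1 : Nat) : Int) ≠ -1 := by
    rw [Ne, PySem.Chars.findFrom_natCast_eq_neg_one_iff _ _ 1 hlen2]
    exact fun h => h hocc
  obtain ⟨hge, hpre, hmin⟩ := PySem.Chars.findFrom_natCast_spec (s ++ s) s 1 hlen2 hne
  set f := PySem.Chars.findFrom (s ++ s) s ((1 : Nat) : Int) with hf
  have hf1 : (1 : Int) ≤ f := by exact_mod_cast hge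
  have hf0 : (0 : Int) ≤ f := by omega
  have hoccn : s <+: (s ++ s).drop n := by
    rw [List.drop_left' rfl]
  have hfn : f.toNat ≤ n := by
    by_contra h
    exact hmin n hn (by omega) hoccn
  have hkey : f ≠ (n : Int) ↔ ∃ j : Nat, 1 ≤ j ∧ j < n ∧ s.rotate j = s := by
    constructor
    · intro hne_n
      have hlt : f.toNat < n := by
        rcases Nat.lt_or_ge f.toNat n with h | h
        · exact h
        · exfalso; apply hne_n
          have : f.toNat = n := by omega
          rw [← this, Int.toNat_of_nonneg hf0]
      refine ⟨f.toNat, by omega, hlt, ?_⟩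
      exact (prefix_drop_iff_rotate s f.toNat (by omega) (by omega)).mp hpre
    · rintro ⟨j, hj1, hjn, hrot⟩
      have hprej : s <+: (s ++ s).drop j :=
        (prefix_drop_iff_rotate s j hj1 (by omega)).mpr hrot
      have hfj : f.toNat ≤ j := by
        by_contra h
        exact hmin j hj1 (by omega) hprej
      intro habs
      have : f.toNat = n := by
        rw [habs]; exact Int.toNat_natCast n
      omega
  rw [Bool.eq_iff_iff, hA, exists_div_iff_exists_rot s hn, ← hkey]
  rw [hc1] at hf
  simp [bne_iff_ne, ← hf, ← hndef]

-- ===== VERDICT (by name: the statement is the Claim_ definition above) =====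
theorem is_repeated_pattern_spec : Claim_equal_is_repeated_pattern := by
  intro num _
  unfold Spec_is_repeated_pattern is_repeated_pattern is_repeated_pattern_alt
  exact main_iff _ (toChars_ne_nil num)
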